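-- pv_equiv track=rewrite | github.com/Kaleemulla/Kaleemulla_Projects | Graphs/RectangleMania.py | getRectangleCount
-- ===== SOURCE A (Python) =====
-- def getRectangleCount(coords, coordTable):
--     rectangleCount = 0
--     for x1, y1 in coords:
--         for x2, y2 in coords:
--             if not isUpperRight(x1,y1,x2,y2):
--                 continue
--             upperCoord = f'{x1}-{y2}'
--             rightCoord = f'{x2}-{y1}'
--             if upperCoord in coordTable and rightCoord in coordTable:
--                 rectangleCount += 1
--
--     return rectangleCount
--
-- def isUpperRight(x1, y1, x2, y2):
--     return x2 > x1 and y2 > y1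
-- ===== SOURCE B (Python) =====
-- def getRectangleCount(coords, coordTable):
--     # Index the points by column: x -> list of y values (duplicates kept, insertion order).
--     columns = {}
--     for x, y in coords:
--         columns.setdefault(x, []).append(y)
--     count = 0
--     for x1, ys1 in columns.items():
--         for x2, ys2 in columns.items():
--             if x2 <= x1:
--                 continue
--             for y1 in ys1:
--                 for y2 in ys2:
--                     if y2 > y1 and f'{x1}-{y2}' in coordTable and f'{x2}-{y1}' in coordTable:
--                         count += 1
--     return count
-- ===== Notes on version B (the rewrite author's own statement) =====
-- stated objective: alternative
-- what changed: B first indexes the points by x-coordinate into a dict of columns, then counts over ordered column pairs (x1 < x2) and y-pairs within them, replacing A's flat all-pairs scan over the raw point list with a grouped traversal of the column index.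
import Mathlib
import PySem

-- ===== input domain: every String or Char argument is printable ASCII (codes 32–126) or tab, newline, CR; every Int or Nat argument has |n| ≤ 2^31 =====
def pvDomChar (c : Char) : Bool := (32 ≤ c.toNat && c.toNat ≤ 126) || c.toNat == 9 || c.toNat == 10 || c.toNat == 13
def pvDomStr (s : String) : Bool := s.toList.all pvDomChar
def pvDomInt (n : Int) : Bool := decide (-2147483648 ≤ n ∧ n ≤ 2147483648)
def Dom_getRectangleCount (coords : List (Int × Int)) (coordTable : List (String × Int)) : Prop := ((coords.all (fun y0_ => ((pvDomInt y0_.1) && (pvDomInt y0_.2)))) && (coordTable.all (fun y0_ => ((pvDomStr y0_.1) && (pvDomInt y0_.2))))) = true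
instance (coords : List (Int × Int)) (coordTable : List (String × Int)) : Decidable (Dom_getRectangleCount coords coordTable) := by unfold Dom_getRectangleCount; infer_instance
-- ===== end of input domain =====

-- B groups the points into a column index (x -> list of y's, duplicates kept) and counts over
-- ordered column pairs instead of A's flat all-pairs scan over the point list (objective: alternative).

-- ===== PORT A =====
-- helper isUpperRight of A
def isUpperRight (x1 y1 x2 y2 : Int) : Bool := decide (x2 > x1) && decide (y2 > y1)

-- f'{a}-{b}' corner key (both Pythons build it with the same f-string)
def pvKey (a b : Int) : String := PySem.Int.toStr a ++ "-" ++ PySem.Int.toStr b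

-- 'key in coordTable' (dict membership = key occurs in the association list)
def pvHasKey (t : List (String × Int)) (k : String) : Bool := t.any (fun kv => kv.1 == k)

def getRectangleCount (coords : List (Int × Int)) (coordTable : List (String × Int)) : Int :=
  coords.foldl (fun acc p =>
    coords.foldl (fun acc q =>
      if !(isUpperRight p.1 p.2 q.1 q.2) then acc
      else if pvHasKey coordTable (pvKey p.1 q.2) && pvHasKey coordTable (pvKey q.1 p.2)
        then acc + 1 else acc) acc) 0

-- ===== PORT B =====
-- columns.setdefault(x, []).append(y)
def pvColumns (coords : List (Int × Int)) : PySem.Dict Int (List Int) :=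
  coords.foldl (fun d p => d.modify p.1 [] (fun ys => ys ++ [p.2])) PySem.Dict.empty

def getRectangleCount_alt (coords : List (Int × Int)) (coordTable : List (String × Int)) : Int :=
  let items := (pvColumns coords).items
  items.foldl (fun acc c1 =>
    items.foldl (fun acc c2 =>
      if c2.1 ≤ c1.1 then acc
      else c1.2.foldl (fun acc y1 =>
        c2.2.foldl (fun acc y2 =>
          if decide (y2 > y1) && pvHasKey coordTable (pvKey c1.1 y2) && pvHasKey coordTable (pvKey c2.1 y1)
            then acc + 1 else acc) acc) acc) acc) 0

-- ===== PRECONDITION & SPEC =====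
def Spec_getRectangleCount (coords : List (Int × Int)) (coordTable : List (String × Int)) (out : Int) : Prop := out = getRectangleCount_alt coords coordTable
instance (coords : List (Int × Int)) (coordTable : List (String × Int)) (out : Int) : Decidable (Spec_getRectangleCount coords coordTable out) := by unfold Spec_getRectangleCount; infer_instance

-- ===== CLAIM (what is proved, stated in full; the proofs are below) =====
def Claim_equal_getRectangleCount : Prop := ∀ (coords : List (Int × Int)) (coordTable : List (String × Int)), Dom_getRectangleCount coords coordTable → Spec_getRectangleCount coords coordTable (getRectangleCount coords coordTable)

-- ===== LEMMAS AND PROOFS =====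

-- the 0/1 contribution of an ordered pair of points
def pvF (t : List (String × Int)) (p q : Int × Int) : Int :=
  if decide (q.1 > p.1) && decide (q.2 > p.2)
      && pvHasKey t (pvKey p.1 q.2) && pvHasKey t (pvKey q.1 p.2) then 1 else 0

lemma inner_A (t : List (String × Int)) (p : Int × Int) (l : List (Int × Int)) (a : Int) :
    l.foldl (fun acc q =>
      if !(isUpperRight p.1 p.2 q.1 q.2) then acc
      else if pvHasKey t (pvKey p.1 q.2) && pvHasKey t (pvKey q.1 p.2)
        then acc + 1 else acc) a = a + (l.map (pvF t p)).sum := by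
  rw [PySem.List.foldl_congr_mem (g := fun acc q => acc + pvF t p q)]
  · exact PySem.List.foldl_add _ _ _
  · intro acc q _
    simp only [pvF, isUpperRight]
    by_cases h1 : q.1 > p.1
    · by_cases h2 : q.2 > p.2
      · simp only [h1, h2, decide_true, Bool.true_and, Bool.not_true, Bool.false_eq_true,
          if_false]
        split <;> simp
      · simp [h1, h2]
    · simp [h1]

lemma A_eq_sum (coords : List (Int × Int)) (t : List (String × Int)) :
    getRectangleCount coords t
      = (coords.map (fun p => (coords.map (pvF t p)).sum)).sum := by
  unfold getRectangleCount
  rw [PySem.List.foldl_congr_mem (g := fun acc p => acc + (coords.map (pvF t p)).sum)]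
  · rw [PySem.List.foldl_add]; simp
  · intro acc p _; exact inner_A t p coords acc

lemma list_sum_comm (l1 : List (Int × List Int)) (l2 : List Int)
    (f : (Int × List Int) → Int → Int) :
    (l1.map (fun x => (l2.map (f x)).sum)).sum
      = (l2.map (fun y => (l1.map (fun x => f x y)).sum)).sum := by
  induction l1 with
  | nil => simp
  | cons a tl ih =>
      simp only [List.map_cons, List.sum_cons, ih]
      rw [← PySem.List.sum_map_add_int]

-- flatten a column list back into points
def pvFlat (l : List (Int × List Int)) : List (Int × Int) :=
  l.flatMap (fun c => c.2.map (fun y => (c.1, y)))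

lemma pvFlat_cons (a : Int × List Int) (l : List (Int × List Int)) :
    pvFlat (a :: l) = a.2.map (fun y => (a.1, y)) ++ pvFlat l := by
  simp [pvFlat]

lemma sum_map_flat (l : List (Int × List Int)) (g : Int × Int → Int) :
    ((pvFlat l).map g).sum
      = (l.map (fun c => (c.2.map (fun y => g (c.1, y))).sum)).sum := by
  induction l with
  | nil => simp [pvFlat]
  | cons a tl ih =>
      unfold pvFlat at ih ⊢
      simp [List.flatMap_cons, ih, Function.comp_def]

lemma B_inner (t : List (String × Int)) (c1 c2 : Int × List Int) (a : Int) :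
    (if c2.1 ≤ c1.1 then a
     else c1.2.foldl (fun acc y1 =>
       c2.2.foldl (fun acc y2 =>
         if decide (y2 > y1) && pvHasKey t (pvKey c1.1 y2) && pvHasKey t (pvKey c2.1 y1)
           then acc + 1 else acc) acc) a)
    = a + (c1.2.map (fun y1 =>
        (c2.2.map (fun y2 => pvF t (c1.1, y1) (c2.1, y2))).sum)).sum := by
  by_cases hle : c2.1 ≤ c1.1
  · simp only [hle, if_true]
    have hz : (c1.2.map (fun y1 =>
        (c2.2.map (fun y2 => pvF t (c1.1, y1) (c2.1, y2))).sum)).sum = 0 := by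
      apply List.sum_eq_zero
      intro x hx
      rcases List.mem_map.mp hx with ⟨y1, _, rfl⟩
      apply List.sum_eq_zero
      intro z hz
      rcases List.mem_map.mp hz with ⟨y2, _, rfl⟩
      simp [pvF, not_lt.mpr hle]
    omega
  · simp only [hle, if_false]
    have hd : decide (c2.1 > c1.1) = true := by simp; omega
    rw [PySem.List.foldl_congr_mem (g := fun acc y1 =>
      acc + (c2.2.map (fun y2 => pvF t (c1.1, y1) (c2.1, y2))).sum)]
    · exact PySem.List.foldl_add _ _ _
    · intro acc y1 _
      rw [PySem.List.foldl_congr_mem (g := fun acc y2 => acc + pvF t (c1.1, y1) (c2.1, y2))]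
      · exact PySem.List.foldl_add _ _ _
      · intro acc2 y2 _
        simp only [pvF, hd, Bool.true_and]
        split <;> simp

lemma B_eq_sum (coords : List (Int × Int)) (t : List (String × Int)) :
    getRectangleCount_alt coords t
      = ((pvFlat (pvColumns coords).items).map
          (fun p => ((pvFlat (pvColumns coords).items).map (pvF t p)).sum)).sum := by
  unfold getRectangleCount_alt
  dsimp only
  rw [PySem.List.foldl_congr_mem (g := fun acc c1 =>
    acc + ((pvColumns coords).items.map (fun c2 => (c1.2.map (fun y1 =>
      (c2.2.map (fun y2 => pvF t (c1.1, y1) (c2.1, y2))).sum)).sum)).sum)]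
  · rw [PySem.List.foldl_add]
    rw [sum_map_flat]
    simp only [zero_add]
    refine congrArg List.sum (List.map_congr_left ?_)
    intro c1 _
    rw [list_sum_comm]
    refine congrArg List.sum (List.map_congr_left ?_)
    intro y1 _
    rw [sum_map_flat]
  · intro acc c1 _
    rw [PySem.List.foldl_congr_mem (g := fun acc c2 =>
      acc + (c1.2.map (fun y1 =>
        (c2.2.map (fun y2 => pvF t (c1.1, y1) (c2.1, y2))).sum)).sum)]
    · exact PySem.List.foldl_add _ _ _
    · intro acc2 c2 _
      exact B_inner t c1 c2 acc2

lemma flat_replace (x y : Int) (ys : List Int) :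
    ∀ (l : List (Int × List Int)), (l.map Prod.fst).Nodup → (x, ys) ∈ l →
    (pvFlat (l.map (fun p => if p.1 == x then (x, ys ++ [y]) else p))).Perm
      ((x, y) :: pvFlat l) := by
  intro l
  induction l with
  | nil => intro _ h; simp at h
  | cons a tl ih =>
      intro hnd hmem
      simp only [List.map_cons, List.nodup_cons] at hnd
      by_cases ha : a.1 = x
      · have haeq : a = (x, ys) := by
          rcases List.mem_cons.mp hmem with h | h
          · exact h.symm
          · exact absurd (ha ▸ (List.mem_map.mpr ⟨(x, ys), h, rfl⟩)) hnd.1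
        subst haeq
        have htl : tl.map (fun p => if p.1 == x then (x, ys ++ [y]) else p) = tl := by
          conv_rhs => rw [← List.map_id tl]
          apply List.map_congr_left
          intro p hp
          have hpx : p.1 ≠ x := fun h => hnd.1 (h ▸ List.mem_map.mpr ⟨p, hp, rfl⟩)
          simp [hpx]
        simp only [List.map_cons, beq_self_eq_true, if_pos, htl, pvFlat_cons]
        rw [List.map_append, List.append_assoc]
        simp only [List.map_cons, List.map_nil, List.singleton_append]
        exact List.perm_middle
      · have hmem' : (x, ys) ∈ tl := by
          rcases List.mem_cons.mp hmem with h | h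
          · exact absurd (congrArg Prod.fst h.symm) ha
          · exact h
        have hrec := ih hnd.2 hmem'
        have hfa : (if a.1 == x then (x, ys ++ [y]) else a) = a := by simp [ha]
        simp only [List.map_cons, hfa, pvFlat_cons]
        exact (hrec.append_left _).trans List.perm_middle

lemma flat_modify (d : PySem.Dict Int (List Int)) (hnd : d.keys.Nodup) (x y : Int) :
    (pvFlat ((d.modify x [] (fun ys => ys ++ [y])).items)).Perm ((x, y) :: pvFlat d.items) := by
  show (pvFlat ((d.insert x (d.getD x [] ++ [y])).items)).Perm _
  by_cases hc : d.contains x = true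
  · have hsome : (d.get? x).isSome = true := by
      rw [← PySem.Dict.contains_eq_isSome_get?]; exact hc
    rcases Option.isSome_iff_exists.mp hsome with ⟨ys, hget⟩
    have hmem := PySem.Dict.mem_items_of_get?_eq_some d hget
    have hgetD : d.getD x [] = ys := PySem.Dict.getD_of_mem_items d hmem hnd []
    rw [hgetD, PySem.Dict.items_insert_of_contains d _ hc]
    exact flat_replace x y ys d.items hnd hmem
  · have hget : d.get? x = none := by
      rw [PySem.Dict.contains_eq_isSome_get?] at hc
      exact Option.not_isSome_iff_eq_none.mp (by simp [hc])
    have hgetD : d.getD x [] = [] := by simp [PySem.Dict.getD, hget]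
    rw [hgetD, PySem.Dict.items_insert_of_not_contains d _ (by simpa using hc)]
    have : pvFlat (d.items ++ [(x, [] ++ [y])]) = pvFlat d.items ++ [(x, y)] := by
      simp [pvFlat]
    rw [this]
    exact List.perm_append_singleton _ _

lemma columns_aux :
    ∀ (coords : List (Int × Int)) (d : PySem.Dict Int (List Int)), d.keys.Nodup →
    (pvFlat ((coords.foldl (fun d p => d.modify p.1 [] (fun ys => ys ++ [p.2])) d).items)).Perm
      (pvFlat d.items ++ coords) := by
  intro coords
  induction coords with
  | nil => intro d _; simp
  | cons p tl ih =>
      intro d hnd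
      have hnd' : (d.modify p.1 [] (fun ys => ys ++ [p.2])).keys.Nodup :=
        PySem.Dict.nodup_keys_insert d _ _ hnd
      simp only [List.foldl_cons]
      refine (ih _ hnd').trans ?_
      refine ((flat_modify d hnd p.1 p.2).append_right tl).trans ?_
      simp only [List.cons_append]
      exact List.perm_middle.symm

lemma flat_columns_perm (coords : List (Int × Int)) :
    (pvFlat (pvColumns coords).items).Perm coords := by
  have h := columns_aux coords PySem.Dict.empty PySem.Dict.nodup_keys_empty
  simpa [pvColumns, pvFlat, PySem.Dict.empty] using h

lemma double_sum_perm (t : List (String × Int)) {l1 l2 : List (Int × Int)} (h : l1.Perm l2) :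
    (l1.map (fun p => (l1.map (pvF t p)).sum)).sum
      = (l2.map (fun p => (l2.map (pvF t p)).sum)).sum := by
  have hinner : (fun p => (l1.map (pvF t p)).sum) = (fun p => (l2.map (pvF t p)).sum) := by
    funext p
    exact List.Perm.sum_eq (h.map (pvF t p))
  rw [hinner]
  exact List.Perm.sum_eq (h.map _)

-- ===== VERDICT (by name: the statement is the Claim_ definition above) =====
theorem getRectangleCount_spec : Claim_equal_getRectangleCount := by
  intro coords t _
  unfold Spec_getRectangleCount
  rw [A_eq_sum, B_eq_sum]
  exact (double_sum_perm t (flat_columns_perm coords)).symm
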